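-- pv_equiv track=rewrite | github.com/mtreviso/arr-report-generator | arr_report_generator.py | classify_comment_type
-- ===== SOURCE A (Python) =====
-- def classify_comment_type(reply):
--     """Determine the type of comment."""
--     invitations = reply.get("invitations", [])
--     if any("/-/Review_Issue_Report" in inv for inv in invitations):
--         return "Review Issue"
--     elif any("/-/Author-Editor_Confidential_Comment" in inv for inv in invitations):
--         return "Author-Editor Confidential"
--     elif any("/-/Comment" in inv for inv in invitations):
--         return "Confidential Comment"
--     else:
--         return "Other"
-- ===== SOURCE B (Python) =====
-- def classify_comment_type(reply):
--     """Determine the type of comment."""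
--     seen_review_issue = False
--     seen_author_editor = False
--     seen_comment = False
--     for inv in reply.get("invitations", []):
--         if "/-/Review_Issue_Report" in inv:
--             seen_review_issue = True
--         if "/-/Author-Editor_Confidential_Comment" in inv:
--             seen_author_editor = True
--         if "/-/Comment" in inv:
--             seen_comment = True
--     if seen_review_issue:
--         return "Review Issue"
--     if seen_author_editor:
--         return "Author-Editor Confidential"
--     if seen_comment:
--         return "Confidential Comment"
--     return "Other"
-- ===== Notes on version B (the rewrite author's own statement) =====
-- stated objective: alternative
-- what changed: Replaces three separate short-circuiting any() scans over the invitations with one pass that records three presence flags, followed by a separate priority decision.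
import Mathlib
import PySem

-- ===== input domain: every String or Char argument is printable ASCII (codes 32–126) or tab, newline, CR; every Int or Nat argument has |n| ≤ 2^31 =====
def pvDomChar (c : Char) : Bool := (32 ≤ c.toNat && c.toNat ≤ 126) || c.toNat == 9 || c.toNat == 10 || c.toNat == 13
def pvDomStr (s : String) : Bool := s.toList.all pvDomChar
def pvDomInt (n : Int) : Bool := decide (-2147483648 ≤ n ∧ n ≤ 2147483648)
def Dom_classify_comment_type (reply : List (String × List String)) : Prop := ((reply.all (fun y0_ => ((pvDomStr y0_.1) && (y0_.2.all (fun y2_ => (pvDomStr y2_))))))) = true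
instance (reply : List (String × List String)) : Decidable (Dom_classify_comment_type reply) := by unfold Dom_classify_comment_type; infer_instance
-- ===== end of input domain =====

-- B replaces A's three separate short-circuiting any() scans with one flag-collecting pass plus a priority decision (alternative decomposition, same cost).


-- ===== PORT A =====
-- reply.get("invitations", []): first-match lookup in the association list (dict keys are unique)
def pvGetInvitations (reply : List (String × List String)) : List String :=
  match reply.find? (fun p => p.1 == "invitations") with
  | some p => p.2
  | none => []

def classify_comment_type (reply : List (String × List String)) : String :=
  let invitations := pvGetInvitations reply
  if invitations.any (fun inv => PySem.Str.isIn "/-/Review_Issue_Report" inv) then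
    "Review Issue"
  else if invitations.any (fun inv => PySem.Str.isIn "/-/Author-Editor_Confidential_Comment" inv) then
    "Author-Editor Confidential"
  else if invitations.any (fun inv => PySem.Str.isIn "/-/Comment" inv) then
    "Confidential Comment"
  else
    "Other"

-- ===== PORT B =====
def classify_comment_type_alt (reply : List (String × List String)) : String :=
  let flags := (pvGetInvitations reply).foldl
    (fun (st : Bool × Bool × Bool) inv =>
      ( st.1 || PySem.Str.isIn "/-/Review_Issue_Report" inv,
        st.2.1 || PySem.Str.isIn "/-/Author-Editor_Confidential_Comment" inv,
        st.2.2 || PySem.Str.isIn "/-/Comment" inv ))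
    (false, false, false)
  if flags.1 then "Review Issue"
  else if flags.2.1 then "Author-Editor Confidential"
  else if flags.2.2 then "Confidential Comment"
  else "Other"

-- ===== PRECONDITION & SPEC =====
def Spec_classify_comment_type (reply : List (String × List String)) (out : String) : Prop := out = classify_comment_type_alt reply
instance (reply : List (String × List String)) (out : String) : Decidable (Spec_classify_comment_type reply out) := by unfold Spec_classify_comment_type; infer_instance

-- ===== CLAIM (what is proved, stated in full; the proofs are below) =====
def Claim_equal_classify_comment_type : Prop := ∀ (reply : List (String × List String)), Dom_classify_comment_type reply → Spec_classify_comment_type reply (classify_comment_type reply)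

-- ===== LEMMAS AND PROOFS =====
-- B's single fold computes exactly the three any-scans A performs.
theorem pv_fold_flags (invs : List String) (a b c : Bool) :
    invs.foldl
      (fun (st : Bool × Bool × Bool) inv =>
        ( st.1 || PySem.Str.isIn "/-/Review_Issue_Report" inv,
          st.2.1 || PySem.Str.isIn "/-/Author-Editor_Confidential_Comment" inv,
          st.2.2 || PySem.Str.isIn "/-/Comment" inv ))
      (a, b, c)
    = ( a || invs.any (fun inv => PySem.Str.isIn "/-/Review_Issue_Report" inv),
        b || invs.any (fun inv => PySem.Str.isIn "/-/Author-Editor_Confidential_Comment" inv),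
        c || invs.any (fun inv => PySem.Str.isIn "/-/Comment" inv) ) := by
  induction invs generalizing a b c with
  | nil => simp
  | cons h t ih =>
    simp only [List.foldl_cons, List.any_cons, ih]
    simp [Bool.or_assoc]

-- ===== VERDICT (by name: the statement is the Claim_ definition above) =====
theorem classify_comment_type_spec : Claim_equal_classify_comment_type := by
  intro reply _
  unfold Spec_classify_comment_type classify_comment_type classify_comment_type_alt
  rw [pv_fold_flags]
  simp
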